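-- pv_equiv track=rewrite | github.com/nhanltt/myFirstPythonHW | CoffeeCal3.py | buy
-- ===== SOURCE A (Python) =====
-- def check_remain(water, milk, cf_beans, cf_type):
--
--     message = []
--     c = False
--     if (cf_type == 1) :
--         if (water < 250) :
--             message.append("water")
--             c = True
--         if (cf_beans < 16):
--             message.append("coffee beans")
--             c = True
--     elif (cf_type == 2):
--         if (water < 350) :
--             message.append("water")
--             c = True
--         if (milk < 75) :
--             message.append("milk")
--             c = True
--         if (cf_beans < 20):
--             message.append("coffee beans")
--             c = True
--     elif (cf_type == 3):
--         if (water < 200) :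
--             message.append("water")
--             c = True
--         if (milk < 100) :
--             message.append("milk")
--             c = True
--         if (cf_beans < 12):
--             message.append("coffee beans")
--             c = True
--     if c :
--         return message
--     else:
--         message.append("enough")
--     return message
--
-- def buy(cf_type, water, milk, cf_beans, cup, money):
--     # Calculate the ingredients remains
--     cf_type = int(cf_type)
--     message = []
--     check = check_remain(water, milk, cf_beans, cf_type)
--     if check == ["enough"]:
--         message.append("I have enough resources, making you a coffee!")
--         if (cf_type == 1):
--             water -= 250
--             cf_beans -= 16
--             money += 4
--         elif cf_type == 2:
--             water -= 350
--             milk -= 75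
--             cf_beans -= 20
--             money += 7
--         elif cf_type == 3:
--             water -= 200
--             milk -= 100
--             cf_beans -= 12
--             money += 6
--         cup -= 1
--     else:
--         for i in check:
--             message.append("Sorry! Not enough " + i)
--     return water, milk, cf_beans, cup, money, message
-- ===== SOURCE B (Python) =====
-- RECIPES = {
--     1: {"water": 250, "coffee beans": 16, "_price": 4},
--     2: {"water": 350, "milk": 75, "coffee beans": 20, "_price": 7},
--     3: {"water": 200, "milk": 100, "coffee beans": 12, "_price": 6},
-- }
--
-- def buy(cf_type, water, milk, cf_beans, cup, money):
--     cf_type = int(cf_type)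
--     recipe = RECIPES.get(cf_type, {})
--     have = {"water": water, "milk": milk, "coffee beans": cf_beans}
--     short = [name for name in ("water", "milk", "coffee beans")
--              if name in recipe and have[name] < recipe[name]]
--     if short:
--         return water, milk, cf_beans, cup, money, ["Sorry! Not enough " + s for s in short]
--     return (water - recipe.get("water", 0),
--             milk - recipe.get("milk", 0),
--             cf_beans - recipe.get("coffee beans", 0),
--             cup - 1,
--             money + recipe.get("_price", 0),
--             ["I have enough resources, making you a coffee!"])
-- ===== Notes on version B (the rewrite author's own statement) =====
-- stated objective: simpler
-- what changed: Replaces the per-type if/elif cascades and the 'enough' sentinel-list handshake between check_remain and buy with a single recipe table keyed by cf_type: one generic shortage scan over the ordered ingredients plus table-driven deductions.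
import Mathlib
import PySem

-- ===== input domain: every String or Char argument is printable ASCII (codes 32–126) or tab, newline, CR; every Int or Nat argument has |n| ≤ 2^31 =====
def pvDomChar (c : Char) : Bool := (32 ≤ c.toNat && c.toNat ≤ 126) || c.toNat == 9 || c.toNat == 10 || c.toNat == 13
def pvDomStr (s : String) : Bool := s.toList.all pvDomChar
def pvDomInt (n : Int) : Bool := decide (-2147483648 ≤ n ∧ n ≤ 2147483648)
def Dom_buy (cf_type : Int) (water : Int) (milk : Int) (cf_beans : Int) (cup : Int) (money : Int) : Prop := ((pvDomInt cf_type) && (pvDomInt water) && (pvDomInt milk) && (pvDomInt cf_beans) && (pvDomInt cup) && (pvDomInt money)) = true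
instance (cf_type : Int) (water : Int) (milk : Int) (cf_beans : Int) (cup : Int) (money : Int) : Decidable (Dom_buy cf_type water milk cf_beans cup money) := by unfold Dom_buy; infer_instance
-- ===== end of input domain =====

-- B replaces the per-type if/elif cascades with a single recipe table and one generic shortage scan (objective: simpler).
-- ===== PORT A =====
-- literal transliteration of check_remain: message list + flag c, branches in source order
def check_remain (water : Int) (milk : Int) (cf_beans : Int) (cf_type : Int) : List String :=
  let message : List String := []
  let c : Bool := false
  let (message, c) :=
    if cf_type = 1 then
      let (message, c) := if water < 250 then (message ++ ["water"], true) else (message, c)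
      let (message, c) := if cf_beans < 16 then (message ++ ["coffee beans"], true) else (message, c)
      (message, c)
    else if cf_type = 2 then
      let (message, c) := if water < 350 then (message ++ ["water"], true) else (message, c)
      let (message, c) := if milk < 75 then (message ++ ["milk"], true) else (message, c)
      let (message, c) := if cf_beans < 20 then (message ++ ["coffee beans"], true) else (message, c)
      (message, c)
    else if cf_type = 3 then
      let (message, c) := if water < 200 then (message ++ ["water"], true) else (message, c)
      let (message, c) := if milk < 100 then (message ++ ["milk"], true) else (message, c)
      let (message, c) := if cf_beans < 12 then (message ++ ["coffee beans"], true) else (message, c)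
      (message, c)
    else (message, c)
  if c then message else message ++ ["enough"]

def buy (cf_type : Int) (water : Int) (milk : Int) (cf_beans : Int) (cup : Int) (money : Int) : Int × Int × Int × Int × Int × List String :=
  -- int(cf_type) is the identity on an Int argument
  let check := check_remain water milk cf_beans cf_type
  if check = ["enough"] then
    let message : List String := ["I have enough resources, making you a coffee!"]
    let (water, milk, cf_beans, money) :=
      if cf_type = 1 then (water - 250, milk, cf_beans - 16, money + 4)
      else if cf_type = 2 then (water - 350, milk - 75, cf_beans - 20, money + 7)
      else if cf_type = 3 then (water - 200, milk - 100, cf_beans - 12, money + 6)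
      else (water, milk, cf_beans, money)
    (water, milk, cf_beans, cup - 1, money, message)
  else
    (water, milk, cf_beans, cup, money, check.map (fun i => "Sorry! Not enough " ++ i))

-- ===== PORT B =====
-- the recipe table of Source B, as assoc lists (Python dict -> List (K × V))
def recipes : List (Int × List (String × Int)) :=
  [(1, [("water", 250), ("coffee beans", 16), ("_price", 4)]),
   (2, [("water", 350), ("milk", 75), ("coffee beans", 20), ("_price", 7)]),
   (3, [("water", 200), ("milk", 100), ("coffee beans", 12), ("_price", 6)])]

-- dict get with default (first match)
def dget (d : List (String × Int)) (k : String) (dflt : Int) : Int :=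
  match d.find? (fun p => p.1 == k) with
  | some p => p.2
  | none => dflt

def dmem (d : List (String × Int)) (k : String) : Bool :=
  (d.find? (fun p => p.1 == k)).isSome

def buy_alt (cf_type : Int) (water : Int) (milk : Int) (cf_beans : Int) (cup : Int) (money : Int) : Int × Int × Int × Int × Int × List String :=
  let recipe : List (String × Int) :=
    match recipes.find? (fun p => p.1 == cf_type) with
    | some p => p.2
    | none => []
  let haveAmt : List (String × Int) := [("water", water), ("milk", milk), ("coffee beans", cf_beans)]
  let short := ["water", "milk", "coffee beans"].filter
    (fun name => dmem recipe name && decide (dget haveAmt name 0 < dget recipe name 0))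
  if short ≠ [] then
    (water, milk, cf_beans, cup, money, short.map (fun s => "Sorry! Not enough " ++ s))
  else
    (water - dget recipe "water" 0, milk - dget recipe "milk" 0,
     cf_beans - dget recipe "coffee beans" 0, cup - 1,
     money + dget recipe "_price" 0,
     ["I have enough resources, making you a coffee!"])

-- ===== PRECONDITION & SPEC =====
def Spec_buy (cf_type : Int) (water : Int) (milk : Int) (cf_beans : Int) (cup : Int) (money : Int) (out : Int × Int × Int × Int × Int × List String) : Prop := out = buy_alt cf_type water milk cf_beans cup money
instance (cf_type : Int) (water : Int) (milk : Int) (cf_beans : Int) (cup : Int) (money : Int) (out : Int × Int × Int × Int × Int × List String) : Decidable (Spec_buy cf_type water milk cf_beans cup money out) := by unfold Spec_buy; infer_instance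

-- ===== CLAIM (what is proved, stated in full; the proofs are below) =====
def Claim_equal_buy : Prop := ∀ (cf_type : Int) (water : Int) (milk : Int) (cf_beans : Int) (cup : Int) (money : Int), Dom_buy cf_type water milk cf_beans cup money → Spec_buy cf_type water milk cf_beans cup money (buy cf_type water milk cf_beans cup money)

-- ===== LEMMAS AND PROOFS =====

-- ===== VERDICT (by name: the statement is the Claim_ definition above) =====
theorem buy_eq (cf_type water milk cf_beans cup money : Int) :
    buy cf_type water milk cf_beans cup money = buy_alt cf_type water milk cf_beans cup money := by
  by_cases h1 : cf_type = 1
  · subst h1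
    simp only [buy, buy_alt, check_remain, recipes, dget, dmem, List.find?, List.filter]
    by_cases hw : water < 250 <;> by_cases hb : cf_beans < 16 <;> simp [hw, hb]
  · by_cases h2 : cf_type = 2
    · subst h2
      simp only [buy, buy_alt, check_remain, recipes, dget, dmem, List.find?, List.filter]
      by_cases hw : water < 350 <;> by_cases hm : milk < 75 <;> by_cases hb : cf_beans < 20 <;>
        simp [hw, hm, hb]
    · by_cases h3 : cf_type = 3
      · subst h3
        simp only [buy, buy_alt, check_remain, recipes, dget, dmem, List.find?, List.filter]
        by_cases hw : water < 200 <;> by_cases hm : milk < 100 <;> by_cases hb : cf_beans < 12 <;>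
          simp [hw, hm, hb]
      · simp [buy, buy_alt, check_remain, recipes, dget, dmem, h1, h2, h3, Ne.symm h1, Ne.symm h2, Ne.symm h3]

theorem buy_spec : Claim_equal_buy := by
  intro cf_type water milk cf_beans cup money _
  unfold Spec_buy
  exact buy_eq cf_type water milk cf_beans cup money
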